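-- pv_equiv track=rewrite | github.com/SankBad/Competative_Programming | Interview/StringConversion.py | StringConversion
-- ===== SOURCE A (Python) =====
-- def StringConversion(StringInput):
--     StringOutput = ''
--     val = 0
--     for i in StringInput:
--         if (i=='a' or i=='A'):
--             if val==1:
--                 val=0
--             else:
--                 val = 1
--             continue
--
--         if val==1:
--             if (i.isupper()):
--                 StringOutput = StringOutput +  i.lower()
--             else:
--                 StringOutput = StringOutput + i.upper()
--         else:
--             StringOutput = StringOutput + i
--
--
--     return StringOutput
-- ===== SOURCE B (Python) =====
-- def StringConversion(StringInput):
--     # split-first decomposition: segments between 'a'/'A' markers; toggle odd-index segments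
--     segs = ''.join('a' if c == 'A' else c for c in StringInput).split('a')
--     out = []
--     for k, seg in enumerate(segs):
--         if k % 2 == 0:
--             out.append(seg)
--         else:
--             out.append(''.join(c.lower() if c.isupper() else c.upper() for c in seg))
--     return ''.join(out)
-- ===== Notes on version B (the rewrite author's own statement) =====
-- stated objective: alternative
-- what changed: Replaces the per-character toggle-flag state machine with a split-first decomposition: normalize the marker 'A' to 'a', split the string on 'a', case-toggle the odd-index segments, and join.
import Mathlib
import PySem

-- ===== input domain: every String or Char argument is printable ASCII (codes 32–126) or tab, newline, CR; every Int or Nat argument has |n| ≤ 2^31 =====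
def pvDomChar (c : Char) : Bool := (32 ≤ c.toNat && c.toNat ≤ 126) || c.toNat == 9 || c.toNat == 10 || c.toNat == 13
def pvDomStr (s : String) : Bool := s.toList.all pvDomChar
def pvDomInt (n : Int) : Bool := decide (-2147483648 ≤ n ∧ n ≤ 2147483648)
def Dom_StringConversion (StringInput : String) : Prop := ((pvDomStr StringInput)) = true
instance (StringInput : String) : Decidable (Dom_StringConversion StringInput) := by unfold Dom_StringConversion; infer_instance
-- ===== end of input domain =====

-- B replaces A's per-character toggle-flag state machine with a split-first decomposition
-- (normalize 'A'->'a', split on 'a', toggle odd-index segments, join); same return value, proved equal.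

-- ===== PORT A =====
-- transliteration of A's per-character loop: state = (output so far, val flag)
def StringConversion (StringInput : String) : String :=
  let r := StringInput.toList.foldl (fun (st : List Char × Int) i =>
    if i = 'a' ∨ i = 'A' then
      (st.1, if st.2 = 1 then 0 else 1)
    else if st.2 = 1 then
      if PySem.Chars.isupper i then (st.1 ++ [PySem.Chars.lowerChar i], st.2)
      else (st.1 ++ [PySem.Chars.upperChar i], st.2)
    else
      (st.1 ++ [i], st.2)) ([], 0)
  String.mk r.1

-- ===== PORT B =====
-- Source B's per-character toggle rule: c.lower() if c.isupper() else c.upper()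
def pvToggle (c : Char) : Char :=
  if PySem.Chars.isupper c then PySem.Chars.lowerChar c else PySem.Chars.upperChar c

-- transliteration of Source B: normalize 'A'->'a', split on 'a', toggle odd-index segments, join
def StringConversion_alt (StringInput : String) : String :=
  let segs := PySem.Chars.splitOn
    (StringInput.toList.map (fun c => if c = 'A' then 'a' else c)) ['a']
  let out := (PySem.List.enumerate segs).map (fun p =>
    if PySem.Int.mod p.1 2 = 0 then p.2 else p.2.map pvToggle)
  String.mk (PySem.Chars.join [] out)

-- ===== PRECONDITION & SPEC =====
def Spec_StringConversion (StringInput : String) (out : String) : Prop := out = StringConversion_alt StringInput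
instance (StringInput : String) (out : String) : Decidable (Spec_StringConversion StringInput out) := by unfold Spec_StringConversion; infer_instance

-- ===== CLAIM (what is proved, stated in full; the proofs are below) =====
def Claim_equal_StringConversion : Prop := ∀ (StringInput : String), Dom_StringConversion StringInput → Spec_StringConversion StringInput (StringConversion StringInput)

-- ===== LEMMAS AND PROOFS =====

-- A's loop, written as structural recursion on the remaining input (val as a flag 0/1)
def pvRunA (v : Int) : List Char → List Char
  | [] => []
  | c :: t =>
    if c = 'a' ∨ c = 'A' then pvRunA (if v = 1 then 0 else 1) t
    else (if v = 1 then pvToggle c else c) :: pvRunA v t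

-- splitting on 'a', structurally
def pvSplit : List Char → List (List Char)
  | [] => [[]]
  | c :: t => if c = 'a' then [] :: pvSplit t else (pvSplit t).modifyHead (c :: ·)

lemma pvSplit_ne_nil (l : List Char) : pvSplit l ≠ [] := by
  cases l with
  | nil => simp [pvSplit]
  | cons c t =>
    simp only [pvSplit]
    split
    · simp
    · cases h : pvSplit t with
      | nil => exact absurd h (pvSplit_ne_nil t)
      | cons s r => simp [List.modifyHead]

-- alternately toggled concatenation of segments, starting with flag v
def pvJoinAlt (v : Int) : List (List Char) → List Char
  | [] => []
  | s :: r => (if v = 1 then s.map pvToggle else s) ++ pvJoinAlt (if v = 1 then 0 else 1) r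

-- A's loop body accumulates: fst of the fold = out ++ pvRunA v l
lemma foldA_fst (l : List Char) : ∀ (out : List Char) (v : Int),
    (l.foldl (fun (st : List Char × Int) i =>
      if i = 'a' ∨ i = 'A' then
        (st.1, if st.2 = 1 then 0 else 1)
      else if st.2 = 1 then
        if PySem.Chars.isupper i then (st.1 ++ [PySem.Chars.lowerChar i], st.2)
        else (st.1 ++ [PySem.Chars.upperChar i], st.2)
      else
        (st.1 ++ [i], st.2)) (out, v)).1 = out ++ pvRunA v l := by
  induction l with
  | nil => intro out v; simp [pvRunA]
  | cons c t ih =>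
    intro out v
    by_cases hm : c = 'a' ∨ c = 'A'
    · simp [List.foldl_cons, hm, ih, pvRunA]
    · by_cases hv : v = 1
      · simp [List.foldl_cons, hm, hv, ih, pvRunA, pvToggle]
        split <;> simp
      · simp [List.foldl_cons, hm, hv, ih, pvRunA]

-- A's recursion equals the alternating join over the split of the normalized input
lemma runA_eq_joinAlt_split (l : List Char) : ∀ v, v = 0 ∨ v = 1 →
    pvRunA v l = pvJoinAlt v (pvSplit (l.map (fun c => if c = 'A' then 'a' else c))) := by
  induction l with
  | nil => intro v _; simp [pvRunA, pvSplit, pvJoinAlt]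
  | cons c t ih =>
    intro v hv
    by_cases hm : c = 'a' ∨ c = 'A'
    · have hnorm : (if c = 'A' then 'a' else c) = 'a' := by
        rcases hm with h | h <;> simp [h]
      simp only [pvRunA, hm, if_true, List.map_cons, hnorm, pvSplit, pvJoinAlt]
      rw [ih _ (by rcases hv with h | h <;> simp [h])]
      simp
    · rw [not_or] at hm
      simp only [pvRunA, hm.1, hm.2, or_self, if_false, List.map_cons, pvSplit]
      rw [ih v hv]
      cases hsp : pvSplit (t.map (fun c => if c = 'A' then 'a' else c)) with
      | nil => exact absurd hsp (pvSplit_ne_nil _)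
      | cons s r =>
        simp only [List.modifyHead, pvJoinAlt]
        rcases hv with h | h <;> simp [h]

-- B's enumerate/parity map + join equals the alternating join, for any start index
lemma join_enum_eq_joinAlt (segs : List (List Char)) : ∀ (k : Int), 0 ≤ k →
    PySem.Chars.join [] ((PySem.List.enumerate segs k).map (fun p =>
      if PySem.Int.mod p.1 2 = 0 then p.2 else p.2.map pvToggle))
    = pvJoinAlt (PySem.Int.mod k 2) segs := by
  induction segs with
  | nil => intro k _; simp [PySem.List.enumerate_nil, PySem.Chars.join, List.intercalate, pvJoinAlt]
  | cons s r ih =>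
    intro k hk
    rw [PySem.List.enumerate_cons, List.map_cons]
    have hj : ∀ (x : List Char) (xs : List (List Char)),
        PySem.Chars.join [] (x :: xs) = x ++ PySem.Chars.join [] xs := by
      intro x xs
      cases xs <;> simp [PySem.Chars.join, List.intercalate, List.intersperse]
    rw [hj, ih (k + 1) (by omega)]
    have hmod : PySem.Int.mod k 2 = 0 ∨ PySem.Int.mod k 2 = 1 := by
      have h1 := PySem.Int.mod_nonneg k (b := 2) (by norm_num)
      have h2 := PySem.Int.mod_lt k (b := 2) (by norm_num)
      omega
    have hstep : PySem.Int.mod (k + 1) 2 = (if PySem.Int.mod k 2 = 1 then 0 else 1) := by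
      rw [PySem.Int.mod_eq_emod_of_pos (a := k) (by norm_num)] at hmod
      rw [PySem.Int.mod_eq_emod_of_pos (a := k + 1) (by norm_num),
          PySem.Int.mod_eq_emod_of_pos (a := k) (by norm_num)]
      rcases hmod with h | h <;> simp [h] <;> omega
    rcases hmod with h | h
    · simp only [pvJoinAlt, h, hstep]
      norm_num
    · simp only [pvJoinAlt, h, hstep]
      norm_num

-- PySem's Python split on the single separator "a" is pvSplit
lemma splitOn_go_eq (l : List Char) : ∀ (fuel : Nat) (cur : List Char) (acc : List (List Char)),
    l.length ≤ fuel →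
    PySem.Chars.splitOn.go ['a'] fuel l cur acc
      = acc.reverse ++ (pvSplit l).modifyHead (cur.reverse ++ ·) := by
  induction l with
  | nil =>
    intro fuel cur acc _
    cases fuel <;> simp [PySem.Chars.splitOn.go, pvSplit, List.modifyHead]
  | cons c t ih =>
    intro fuel cur acc hf
    cases fuel with
    | zero => simp at hf
    | succ n =>
      simp only [PySem.Chars.splitOn.go]
      by_cases hc : c = 'a'
      · have hpre : List.isPrefixOf ['a'] (c :: t) = true := by simp [List.isPrefixOf, hc]
        rw [if_pos hpre]
        have hd : List.drop (['a'].length) (c :: t) = t := rfl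
        simp only [List.length_cons] at hf
        rw [hd, ih n [] (cur.reverse :: acc) (by omega)]
        simp only [pvSplit, hc, if_pos, List.modifyHead, List.reverse_cons, List.reverse_nil,
          List.nil_append, List.append_assoc]
        cases pvSplit t <;> simp
      · have hpre : List.isPrefixOf ['a'] (c :: t) = false := by simp [List.isPrefixOf]; exact fun h => hc h.symm
        rw [if_neg (by simp [hpre])]
        simp only [List.length_cons] at hf
        rw [ih n (c :: cur) acc (by omega)]
        simp only [pvSplit, hc, ite_false]
        cases hsp : pvSplit t with
        | nil => exact absurd hsp (pvSplit_ne_nil t)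
        | cons s r => simp [List.modifyHead]

lemma splitOn_eq_pvSplit (l : List Char) : PySem.Chars.splitOn l ['a'] = pvSplit l := by
  rw [PySem.Chars.splitOn, splitOn_go_eq l (l.length + 1) [] [] (by omega)]
  cases hsp : pvSplit l with
  | nil => exact absurd hsp (pvSplit_ne_nil l)
  | cons s r => simp [List.modifyHead]

-- ===== VERDICT (by name: the statement is the Claim_ definition above) =====
theorem StringConversion_spec : Claim_equal_StringConversion := by
  intro s _
  show _ = _
  unfold StringConversion StringConversion_alt
  simp only []
  rw [foldA_fst s.toList [] 0, List.nil_append,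
      splitOn_eq_pvSplit, join_enum_eq_joinAlt _ 0 le_rfl,
      runA_eq_joinAlt_split s.toList 0 (Or.inl rfl)]
  rfl
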